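-- pv_equiv track=rewrite | github.com/P-iotic/My_practice_with_python | testing.py | palindome
-- ===== SOURCE A (Python) =====
-- def palindome(sentence):
--     for i in (",.?'/><}{{}}'"):
--         sentence = sentence.replace(i, "")
--     palindome = []
--     words = sentence.split(' ')
--     for word in words:
--         word = word.lower()
--         if word == word[::-1]:
--             palindome.append(word)
--     return palindome
-- ===== SOURCE B (Python) =====
-- _PUNCT = set(",.?'/><}{{}}'")
--
--
-- def palindome(sentence):
--     cleaned = "".join(c for c in sentence if c not in _PUNCT)
--     words = [w.lower() for w in cleaned.split(' ')]
--     return [w for w in words if w == w[::-1]]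
-- ===== Notes on version B (the rewrite author's own statement) =====
-- stated objective: simpler
-- what changed: Phase one changes from thirteen successive full-string replace() scans (one per punctuation character, duplicates included) to a single character-level pass filtering against a membership set, and the word loop with an accumulator becomes comprehensions.
import Mathlib
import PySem

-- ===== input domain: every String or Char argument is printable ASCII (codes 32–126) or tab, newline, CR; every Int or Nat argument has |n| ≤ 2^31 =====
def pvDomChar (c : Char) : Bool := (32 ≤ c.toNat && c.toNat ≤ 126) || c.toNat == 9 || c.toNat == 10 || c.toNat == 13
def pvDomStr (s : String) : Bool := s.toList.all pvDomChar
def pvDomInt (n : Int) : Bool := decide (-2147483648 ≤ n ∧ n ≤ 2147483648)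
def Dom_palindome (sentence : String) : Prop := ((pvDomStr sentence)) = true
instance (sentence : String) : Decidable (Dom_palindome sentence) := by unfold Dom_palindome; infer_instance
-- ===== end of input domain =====

-- B replaces A's thirteen successive full-string replace() passes by one character-level
-- filtering pass over a membership set, and uses comprehensions instead of an accumulator loop
-- (objective: simpler).

-- ===== PORT A =====
-- the punctuation literal A iterates over (duplicates included, exactly as written)
def pvPunct : List Char := ",.?'/><}{{}}'".toList

def palindome (sentence : String) : List String :=
  let s := pvPunct.foldl (fun acc c => PySem.Str.replace acc (String.singleton c) "") sentence
  let words := (PySem.Str.split? s " ").getD []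
  words.foldl (fun acc word =>
    let w := PySem.Str.lower word
    if PySem.Str.slice? w none none (-1) == some w then acc ++ [w] else acc) []

-- ===== PORT B =====
def pvPunctSet : PySem.Set Char := PySem.Set.ofList ",.?'/><}{{}}'".toList

def palindome_alt (sentence : String) : List String :=
  let cleaned := String.ofList (sentence.toList.filter (fun c => !(decide (c ∈ pvPunctSet))))
  let words := ((PySem.Str.split? cleaned " ").getD []).map PySem.Str.lower
  words.filter (fun w => w.toList.reverse == w.toList)

-- ===== PRECONDITION & SPEC =====
def Spec_palindome (sentence : String) (out : List String) : Prop := out = palindome_alt sentence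
instance (sentence : String) (out : List String) : Decidable (Spec_palindome sentence out) := by unfold Spec_palindome; infer_instance

-- ===== CLAIM (what is proved, stated in full; the proofs are below) =====
def Claim_equal_palindome : Prop := ∀ (sentence : String), Dom_palindome sentence → Spec_palindome sentence (palindome sentence)

-- ===== LEMMAS AND PROOFS =====

-- str.replace(c, "") for a single character c is exactly a filter
theorem replace_go_single (c : Char) : ∀ (l : List Char) (fuel : Nat) (acc : List Char),
    l.length ≤ fuel →
    PySem.Chars.replace.go [c] [] fuel l acc = acc.reverse ++ l.filter (· != c) := by
  intro l
  induction l with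
  | nil =>
    intro fuel acc _
    cases fuel <;> simp [PySem.Chars.replace.go]
  | cons x t ih =>
    intro fuel acc hle
    cases fuel with
    | zero => simp at hle
    | succ n =>
      simp only [PySem.Chars.replace.go, List.isPrefixOf, List.reverse_nil, List.nil_append]
      by_cases hxc : c = x
      · subst hxc
        simp only [BEq.rfl, Bool.true_and]
        have := ih n acc (by simpa using hle)
        simp [this, List.filter]
      · have hb : (c == x) = false := by simp [hxc]
        simp only [hb, Bool.false_and, if_neg Bool.false_ne_true]
        have := ih n (x :: acc) (by simpa using hle)
        rw [this]
        have hxne : (x != c) = true := by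
          simp only [bne_iff_ne, ne_eq]
          exact fun h => hxc h.symm
        simp [hxne]

theorem replace_single (c : Char) (s : List Char) :
    PySem.Chars.replace s [c] [] = s.filter (· != c) := by
  simpa [PySem.Chars.replace] using replace_go_single c s s.length [] le_rfl

-- the replace-loop over the punctuation list is one filter against list membership
theorem foldl_replace_eq_filter (cs : List Char) (s : String) :
    (cs.foldl (fun acc c => PySem.Str.replace acc (String.singleton c) "") s).toList
      = s.toList.filter (fun x => !cs.contains x) := by
  induction cs generalizing s with
  | nil => simp
  | cons c cs ih =>
    simp only [List.foldl_cons]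
    rw [ih]
    have h1 : (PySem.Str.replace s (String.singleton c) "").toList
        = s.toList.filter (· != c) := by
      rw [PySem.Str.toList_replace]
      simpa using replace_single c s.toList
    rw [h1, List.filter_filter]
    apply List.filter_congr
    intro x _
    by_cases hx : x = c <;> simp [hx]

-- the palindrome tests of the two programs agree
theorem cond_eq (w : String) :
    (PySem.Str.slice? w none none (-1) == some w) = (w.toList.reverse == w.toList) := by
  rw [PySem.Str.slice?_none_none_neg_one]
  by_cases h : w.toList.reverse = w.toList
  · simp [h, String.ofList_eq]
  · simp [h, String.ofList_eq]

-- ===== VERDICT (by name: the statement is the Claim_ definition above) =====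
theorem palindome_spec : Claim_equal_palindome := by
  intro sentence _
  unfold Spec_palindome palindome palindome_alt
  have hfilter :
      sentence.toList.filter (fun c => !(decide (c ∈ pvPunctSet)))
        = (pvPunct.foldl (fun acc c => PySem.Str.replace acc (String.singleton c) "") sentence).toList := by
    rw [foldl_replace_eq_filter]
    apply List.filter_congr
    intro x _
    have hmem : (x ∈ pvPunctSet) ↔ x ∈ pvPunct :=
      PySem.Set.mem_ofList (",.?'/><}{{}}'".toList) x
    by_cases hx : x ∈ pvPunct
    · simp [hx, hmem.mpr hx]
    · have hx2 : x ∉ pvPunctSet := fun h => hx (hmem.mp h)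
      simp [hx, hx2]
  rw [(String.ofList_eq.mpr hfilter).symm]
  rw [PySem.List.foldl_append_if
      (fun word => PySem.Str.slice? (PySem.Str.lower word) none none (-1) == some (PySem.Str.lower word))
      PySem.Str.lower]
  rw [List.nil_append, List.filter_map]
  exact congrArg (List.map PySem.Str.lower)
    (List.filter_congr (fun w _ => cond_eq (PySem.Str.lower w)))
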